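-- pv_equiv track=rewrite | github.com/KevenDuan/blueBridgeCup | 20240412/鸡哥的蛋糕大战.py | check
-- ===== SOURCE A (Python) =====
-- def check(n):
--     res = 0
--     s = str(n)
--     for i in s:
--         if i == '0' or i == '6':
--             res += 1
--         elif i == '8':
--             res += 2
--     return res
-- ===== SOURCE B (Python) =====
-- def check(n):
--     weight = {0: 1, 6: 1, 8: 2}
--     m = abs(n)
--     res = weight.get(m % 10, 0)
--     m //= 10
--     while m:
--         res += weight.get(m % 10, 0)
--         m //= 10
--     return res
-- ===== Notes on version B (the rewrite author's own statement) =====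
-- stated objective: alternative
-- what changed: Replaces the string conversion and branching character loop with pure integer arithmetic: a divmod-by-10 loop over abs(n) that accumulates per-digit weights looked up in a table {0:1, 6:1, 8:2}, never building str(n).
import Mathlib
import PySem

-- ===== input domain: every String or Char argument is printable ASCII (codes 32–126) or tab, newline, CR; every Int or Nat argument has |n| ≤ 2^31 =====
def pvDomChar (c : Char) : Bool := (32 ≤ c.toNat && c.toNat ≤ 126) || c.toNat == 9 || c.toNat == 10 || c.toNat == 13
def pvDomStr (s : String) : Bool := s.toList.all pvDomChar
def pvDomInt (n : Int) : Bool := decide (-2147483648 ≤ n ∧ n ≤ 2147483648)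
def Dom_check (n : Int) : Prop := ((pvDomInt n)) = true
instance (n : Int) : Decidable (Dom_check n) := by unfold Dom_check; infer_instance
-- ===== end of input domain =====

-- B replaces the string conversion and branching character loop by a pure-arithmetic divmod-by-10 loop over abs(n) with a weight table; return value only, no side effects.


-- ===== PORT A =====
-- res = 0; for i in str(n): if i=='0' or i=='6': res+=1 elif i=='8': res+=2
def check (n : Int) : Int :=
  (PySem.Int.toChars n).foldl
    (fun res i =>
      if i == '0' || i == '6' then res + 1
      else if i == '8' then res + 2
      else res) 0

-- ===== PORT B =====
-- weight = {0: 1, 6: 1, 8: 2}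
def pvWeight : PySem.Dict Int Int := PySem.Dict.ofList [(0, 1), (6, 1), (8, 2)]

-- while m: res += weight.get(m % 10, 0); m //= 10
def checkAltGo (m : Nat) : Int :=
  if h : m = 0 then 0
  else pvWeight.getD ((m % 10 : Nat) : Int) 0 + checkAltGo (m / 10)
decreasing_by exact Nat.div_lt_self (Nat.pos_of_ne_zero h) (by omega)

-- m = abs(n); res = weight.get(m % 10, 0); m //= 10; while m: …
def check_alt (n : Int) : Int :=
  let m := n.natAbs
  pvWeight.getD ((m % 10 : Nat) : Int) 0 + checkAltGo (m / 10)

-- ===== PRECONDITION & SPEC =====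
def Spec_check (n : Int) (out : Int) : Prop := out = check_alt n
instance (n : Int) (out : Int) : Decidable (Spec_check n out) := by unfold Spec_check; infer_instance

-- ===== CLAIM (what is proved, stated in full; the proofs are below) =====
def Claim_equal_check : Prop := ∀ (n : Int), Dom_check n → Spec_check n (check n)

-- ===== LEMMAS AND PROOFS =====

-- weight of one character, as A's branch assigns it
def charW (c : Char) : Int :=
  if c == '0' || c == '6' then 1 else if c == '8' then 2 else 0

-- A's foldl is the sum of per-character weights
theorem foldl_eq_sum (l : List Char) : ∀ acc : Int,
    l.foldl (fun res i =>
      if i == '0' || i == '6' then res + 1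
      else if i == '8' then res + 2
      else res) acc = acc + (l.map charW).sum := by
  induction l with
  | nil => intro acc; simp
  | cons x xs ih =>
    intro acc
    simp only [List.foldl_cons, List.map_cons, List.sum_cons, ih, charW]
    split_ifs <;> ring

-- the dict lookup agrees with charW on the digit characters
theorem wdig_eq (d : Nat) (hd : d < 10) :
    pvWeight.getD ((d : Nat) : Int) 0 = charW (Nat.digitChar d) := by
  interval_cases d <;> decide

-- core: weight-sum of toDigitsCore equals the divmod recursion
theorem sumW_toDigitsCore : ∀ (fuel n : Nat) (ds : List Char), n < fuel →
    ((Nat.toDigitsCore 10 fuel n ds).map charW).sum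
      = pvWeight.getD ((n % 10 : Nat) : Int) 0 + checkAltGo (n / 10)
        + (ds.map charW).sum := by
  intro fuel
  induction fuel with
  | zero => intro n ds h; omega
  | succ f ih =>
    intro n ds h
    rw [Nat.toDigitsCore]
    by_cases hz : n / 10 = 0
    · rw [if_pos hz, hz]
      simp only [List.map_cons, List.sum_cons]
      rw [wdig_eq (n % 10) (Nat.mod_lt _ (by omega)), checkAltGo]
      simp
    · rw [if_neg hz]
      have hn : 0 < n := by
        rcases Nat.eq_zero_or_pos n with h0 | h0
        · subst h0; simp at hz
        · exact h0
      rw [ih (n / 10) _ (by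
        have := Nat.div_lt_self hn (by omega : (1:Nat) < 10); omega)]
      simp only [List.map_cons, List.sum_cons]
      rw [wdig_eq (n % 10) (Nat.mod_lt _ (by omega))]
      conv_rhs => rw [checkAltGo]
      rw [dif_neg hz]
      ring

theorem sumW_toDigits (m : Nat) :
    ((Nat.toDigits 10 m).map charW).sum
      = pvWeight.getD ((m % 10 : Nat) : Int) 0 + checkAltGo (m / 10) := by
  have := sumW_toDigitsCore (m + 1) m [] (by omega)
  simpa [Nat.toDigits] using this

-- ===== VERDICT (by name: the statement is the Claim_ definition above) =====
theorem check_spec : Claim_equal_check := by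
  intro n _
  unfold Spec_check check check_alt
  rw [foldl_eq_sum]
  unfold PySem.Int.toChars
  by_cases hneg : n < 0
  · rw [if_pos hneg]
    simp only [List.map_cons, List.sum_cons]
    rw [sumW_toDigits]
    simp [charW]
  · rw [if_neg hneg]
    rw [sumW_toDigits]
    have : n.toNat = n.natAbs := by omega
    rw [this]
    ring
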